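-- pv_equiv track=rewrite | github.com/sayantan-2/CSE-DSA-LAB | assignment 9/python/programs/8.py | group_elements_by_first_occurrence
-- ===== SOURCE A (Python) =====
-- def group_elements_by_first_occurrence(arr):
--     element_indices = {}  # Dictionary to store the first occurrence indices of elements
--     grouped_elements = {}
--
--     for index, element in enumerate(arr):
--         if element in element_indices:
--             first_occurrence_index = element_indices[element]
--             if element in grouped_elements:
--                 grouped_elements[element].append(
--                     arr[first_occurrence_index : index + 1]
--                 )
--             else:
--                 grouped_elements[element] = [arr[first_occurrence_index : index + 1]]
--         else:
--             element_indices[element] = index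
--
--     return list(grouped_elements.values())
-- ===== SOURCE B (Python) =====
-- def group_elements_by_first_occurrence(arr):
--     # Two-pass: collect all occurrence indices per element, then emit each
--     # complete group at the element's second occurrence (same order as A).
--     positions = {}
--     for i, x in enumerate(arr):
--         positions.setdefault(x, []).append(i)
--     result = []
--     for i, x in enumerate(arr):
--         ps = positions[x]
--         if len(ps) > 1 and i == ps[1]:
--             result.append([arr[ps[0]:j + 1] for j in ps[1:]])
--     return result
-- ===== Notes on version B (the rewrite author's own statement) =====
-- stated objective: alternative
-- what changed: A builds the groups incrementally in one pass, growing each element's slice list inside a dict as duplicates are met; B first collects every element's full list of occurrence indices in one dict pass and then, in a second pass over the array, emits each complete group at the element's second occurrence, which reproduces A's dict-insertion order.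
import Mathlib
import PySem

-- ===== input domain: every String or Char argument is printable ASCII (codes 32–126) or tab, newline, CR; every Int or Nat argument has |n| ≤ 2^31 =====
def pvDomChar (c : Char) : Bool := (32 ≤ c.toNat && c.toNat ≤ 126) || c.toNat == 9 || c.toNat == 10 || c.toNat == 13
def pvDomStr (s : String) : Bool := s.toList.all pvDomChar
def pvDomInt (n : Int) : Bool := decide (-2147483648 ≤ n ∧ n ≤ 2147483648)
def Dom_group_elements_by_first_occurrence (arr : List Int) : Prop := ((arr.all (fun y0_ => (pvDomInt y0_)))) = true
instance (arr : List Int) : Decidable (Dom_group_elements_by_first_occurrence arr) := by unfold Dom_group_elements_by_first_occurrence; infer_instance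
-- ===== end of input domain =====

-- B replaces A's incremental slice-building dict loop by a two-pass plan: one pass collects all
-- occurrence indices per element, a second pass emits each complete group at the element's
-- second occurrence (alternative decomposition, same output, same asymptotic cost).

-- ===== PORT A =====
-- loop body of A's single for-loop (state: element_indices × grouped_elements)
def stepA (arr : List Int) (st : PySem.Dict Int Int × PySem.Dict Int (List (List Int)))
    (p : Int × Int) : PySem.Dict Int Int × PySem.Dict Int (List (List Int)) :=
  match st.1.get? p.2 with
  | some first =>
      match st.2.get? p.2 with
      | some gs => (st.1, st.2.insert p.2 (gs ++ [PySem.List.slice arr (some first) (some (p.1 + 1))]))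
      | none    => (st.1, st.2.insert p.2 [PySem.List.slice arr (some first) (some (p.1 + 1))])
  | none => (st.1.insert p.2 p.1, st.2)

def group_elements_by_first_occurrence (arr : List Int) : List (List (List Int)) :=
  ((PySem.List.enumerate arr 0).foldl (stepA arr) (PySem.Dict.empty, PySem.Dict.empty)).2.values

-- ===== PORT B =====
def group_elements_by_first_occurrence_alt (arr : List Int) : List (List (List Int)) :=
  let positions : PySem.Dict Int (List Int) :=
    (PySem.List.enumerate arr 0).foldl (fun d p => d.modify p.2 [] (· ++ [p.1])) PySem.Dict.empty
  (PySem.List.enumerate arr 0).foldl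
    (fun res p =>
      let ps := positions.getD p.2 []
      if 1 < ps.length && p.1 == PySem.List.pyGetD ps 1 0 then
        res ++ [ps.tail.map (fun j => PySem.List.slice arr (some (PySem.List.pyGetD ps 0 0)) (some (j + 1)))]
      else res) []

-- ===== PRECONDITION & SPEC =====
def Spec_group_elements_by_first_occurrence (arr : List Int) (out : List (List (List Int))) : Prop := out = group_elements_by_first_occurrence_alt arr
instance (arr : List Int) (out : List (List (List Int))) : Decidable (Spec_group_elements_by_first_occurrence arr out) := by unfold Spec_group_elements_by_first_occurrence; infer_instance

-- ===== CLAIM (what is proved, stated in full; the proofs are below) =====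
def Claim_equal_group_elements_by_first_occurrence : Prop := ∀ (arr : List Int), Dom_group_elements_by_first_occurrence arr → Spec_group_elements_by_first_occurrence arr (group_elements_by_first_occurrence arr)

-- ===== LEMMAS AND PROOFS =====

-- indices of the occurrences of x in xs (what B's `positions[x]` holds at the end)
def occI (xs : List Int) (x : Int) : List Int :=
  ((PySem.List.enumerate xs 0).filter (fun p => p.2 == x)).map (·.1)

-- the group a complete occurrence-index list ps produces
def grp (arr : List Int) (ps : List Int) : List (List Int) :=
  ps.tail.map (fun j => PySem.List.slice arr (some (PySem.List.pyGetD ps 0 0)) (some (j + 1)))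

-- duplicate elements of xs, in order of their second occurrence
def dups (xs : List Int) : List Int :=
  (xs.zipIdx.filter (fun p => (xs.take p.2).count p.1 == 1)).map (·.1)

theorem occI_append (xs : List Int) (r x : Int) :
    occI (xs ++ [r]) x = occI xs x ++ (if r == x then [(xs.length : Int)] else []) := by
  unfold occI
  rw [PySem.List.enumerate_append, List.filter_append, List.map_append]
  simp [PySem.List.enumerate_cons, List.filter]
  split <;> simp_all

theorem countP_enumerate (xs : List Int) (x : Int) : ∀ s,
    ((PySem.List.enumerate xs s).countP (fun p => p.2 == x)) = xs.count x := by
  induction xs with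
  | nil => simp [PySem.List.enumerate]
  | cons a t ih =>
    intro s
    rw [PySem.List.enumerate_cons]
    simp [List.countP_cons, List.count_cons, ih]

theorem length_occI (xs : List Int) (x : Int) : (occI xs x).length = xs.count x := by
  unfold occI
  rw [List.length_map, ← List.countP_eq_length_filter]
  exact countP_enumerate xs x 0

theorem dups_append (xs : List Int) (r : Int) :
    dups (xs ++ [r]) = dups xs ++ (if xs.count r == 1 then [r] else []) := by
  unfold dups
  rw [List.zipIdx_append, List.filter_append, List.map_append]
  congr 1
  · congr 1
    apply List.filter_congr
    intro p hp
    have h := List.mem_zipIdx (x := p.1) (i := p.2) (xs := xs) (k := 0) (by simpa using hp)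
    rw [List.take_append_of_le_length (by omega)]
  · simp [List.zipIdx, List.filter]
    split <;> simp_all

theorem mem_dups_iff (xs : List Int) (x : Int) : x ∈ dups xs ↔ 2 ≤ xs.count x := by
  induction xs using List.reverseRecOn with
  | nil => simp [dups]
  | append_singleton t r ih =>
    rw [dups_append, List.count_append, List.mem_append, ih]
    rcases eq_or_ne r x with h | h
    · subst h
      rcases Nat.lt_or_ge (t.count r) 1 with h1 | h1
      · interval_cases h2 : t.count r; simp_all
      · rcases Nat.eq_or_lt_of_le h1 with h2 | h2 <;> (simp_all; omega)
    · simp [h]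
      intro _ hxr
      exact absurd hxr.symm h

theorem grp_append (arr : List Int) (ps : List Int) (hps : ps ≠ []) (n : Int) :
    grp arr (ps ++ [n]) =
      grp arr ps ++ [PySem.List.slice arr (some (PySem.List.pyGetD ps 0 0)) (some (n + 1))] := by
  rcases ps with _ | ⟨a, t⟩
  · simp at hps
  · simp [grp, PySem.List.pyGetD]

theorem get?_mk_map (l : List Int) (g : Int → List (List Int)) (r : Int) :
    (PySem.Dict.mk (l.map (fun x => (x, g x)))).get? r =
      if r ∈ l then some (g r) else none := by
  induction l with
  | nil => simp [PySem.Dict.get?]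
  | cons a t ih =>
    simp only [List.map_cons, PySem.Dict.get?, List.find?_cons] at ih ⊢
    rcases eq_or_ne a r with h | h
    · simp [h]
    · simp
      split <;> simp_all [Ne.symm h]

theorem contains_mk_map (l : List Int) (g : Int → List (List Int)) (r : Int) :
    (PySem.Dict.mk (l.map (fun x => (x, g x)))).contains r = decide (r ∈ l) := by
  induction l with
  | nil => simp [PySem.Dict.contains]
  | cons a t ih =>
    simp only [List.map_cons, PySem.Dict.contains, List.any_cons] at ih ⊢
    rcases eq_or_ne a r with h | h
    · simp [h]
    · simp [h, Ne.symm h, ih]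

theorem posFold_getD (arr : List Int) (x : Int) :
    ((PySem.List.enumerate arr 0).foldl (fun d p => d.modify p.2 [] (· ++ [p.1]))
      (PySem.Dict.empty : PySem.Dict Int (List Int))).getD x [] = occI arr x := by
  have h : (PySem.List.enumerate arr 0).foldl (fun d p => d.modify p.2 [] (· ++ [p.1]))
      (PySem.Dict.empty : PySem.Dict Int (List Int))
      = ((PySem.List.enumerate arr 0).map (fun p => (p.2, p.1))).foldl
          (fun d q => d.modify q.1 [] (· ++ [q.2])) PySem.Dict.empty := by
    rw [List.foldl_map]
  rw [h, PySem.Dict.getD_foldl_modify_append]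
  simp [occI, List.filter_map, List.map_map]
  rfl

theorem mem_occI_bounds (xs : List Int) (x j : Int) (h : j ∈ occI xs x) :
    0 ≤ j ∧ j < (xs.length : Int) := by
  unfold occI at h
  obtain ⟨p, hp, rfl⟩ := List.mem_map.1 h
  obtain ⟨k, hk, rfl⟩ := (PySem.List.mem_enumerate_iff xs 0 p).1 (List.mem_filter.1 hp).1
  constructor
  · simp
  · simp; omega

theorem pyGetD_append_one (l : List Int) (n : Int) :
    PySem.List.pyGetD (l ++ [n]) 1 0 =
      if l.length ≤ 1 then (if l.length = 1 then n else 0) else PySem.List.pyGetD l 1 0 := by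
  match l with
  | [] => simp [PySem.List.pyGetD, PySem.List.pyGet?, PySem.List.pyIdx?]
  | [a] => simp [PySem.List.pyGetD, PySem.List.pyGet?, PySem.List.pyIdx?]
  | a :: b :: t =>
    simp [PySem.List.pyGetD, PySem.List.pyGet?, PySem.List.pyIdx?]
    rw [if_pos (by positivity)]
    simp

theorem pyGetD_mem_of_lt (l : List Int) (h : 1 < l.length) :
    PySem.List.pyGetD l 1 0 ∈ l := by
  rw [PySem.List.pyGetD_eq_getElem _ _ (by norm_num) (by exact_mod_cast h)]
  exact List.getElem_mem _

theorem bridge (arr : List Int) :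
    ((PySem.List.enumerate arr 0).filter
        (fun p => 1 < (occI arr p.2).length && p.1 == PySem.List.pyGetD (occI arr p.2) 1 0)).map
      (fun p => p.2) = dups arr := by
  induction arr using List.reverseRecOn with
  | nil => simp [PySem.List.enumerate, dups, occI]
  | append_singleton xs r ih =>
    rw [PySem.List.enumerate_append, List.filter_append, List.map_append, dups_append, ← ih]
    congr 1
    · congr 1
      apply List.filter_congr
      intro p hp
      obtain ⟨k, hk, rfl⟩ := (PySem.List.mem_enumerate_iff xs 0 p).1 hp
      simp only [occI_append]
      rcases eq_or_ne r xs[k] with h | h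
      · have hmem : xs[k] ∈ xs := List.getElem_mem hk
        have hm : 1 ≤ (occI xs xs[k]).length := by
          rw [length_occI]; exact (List.count_pos_iff).2 hmem
        simp only [h, beq_self_eq_true, if_pos]
        rcases Nat.eq_or_lt_of_le hm with hm1 | hm2
        · rw [pyGetD_append_one]
          simp [← hm1]
          omega
        · rw [pyGetD_append_one, if_neg (by omega)]
          have h0 : 0 < (occI xs xs[k]).length := by omega
          simp [List.length_append, hm2, h0]
      · simp [h]
    · have e1 : PySem.List.enumerate [r] (0 + (xs.length : Int)) = [((xs.length : Int), r)] := by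
        simp [PySem.List.enumerate]
      rw [e1, List.filter_singleton]
      simp only [occI_append, beq_self_eq_true, if_pos]
      have hlen := length_occI xs r
      rcases hc : xs.count r with _ | m
      · have hnil : occI xs r = [] := List.eq_nil_of_length_eq_zero (by omega)
        simp [hnil, PySem.List.pyGetD, PySem.List.pyGet?, PySem.List.pyIdx?]
      · rcases m with _ | m
        · obtain ⟨f, hf⟩ := List.length_eq_one_iff.1 (by omega : (occI xs r).length = 1)
          rw [pyGetD_append_one]
          simp [hf]
        · have h2 : 1 < (occI xs r).length := by omega
          rw [pyGetD_append_one, if_neg (by omega)]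
          have hb := (mem_occI_bounds xs r _ (pyGetD_mem_of_lt _ h2)).2
          have hne : ((xs.length : Int) == PySem.List.pyGetD (occI xs r) 1 0) = false := by
            simp; omega
          simp [hne]

theorem stepsA_inv (arr : List Int) : ∀ (rest xs : List Int) (ei : PySem.Dict Int Int),
    arr = xs ++ rest →
    (∀ x, ei.get? x = (occI xs x).head?) →
    ((PySem.List.enumerate rest (xs.length : Int)).foldl (stepA arr)
        (ei, PySem.Dict.mk ((dups xs).map (fun x => (x, grp arr (occI xs x)))))).2 =
      PySem.Dict.mk ((dups arr).map (fun x => (x, grp arr (occI arr x)))) := by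
  intro rest
  induction rest with
  | nil =>
    intro xs ei harr hei
    simp [PySem.List.enumerate] at harr ⊢
    subst harr
    rfl
  | cons r rest ih =>
    intro xs ei harr hei
    rw [PySem.List.enumerate_cons, List.foldl_cons]
    have harr' : arr = (xs ++ [r]) ++ rest := by simp [harr]
    have hlen' : (xs.length : Int) + 1 = (((xs ++ [r]).length : Nat) : Int) := by
      simp [List.length_append]
    have hcnt := length_occI xs r
    rcases ho : occI xs r with _ | ⟨f, t⟩
    · -- first occurrence of r
      have hstep : stepA arr (ei, PySem.Dict.mk ((dups xs).map (fun x => (x, grp arr (occI xs x)))))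
          ((xs.length : Int), r)
          = (ei.insert r (xs.length : Int),
             PySem.Dict.mk ((dups xs).map (fun x => (x, grp arr (occI xs x))))) := by
        simp [stepA, hei r, ho]
      rw [hstep]
      have hc0 : xs.count r = 0 := by rw [← hcnt, ho]; rfl
      have hge : PySem.Dict.mk ((dups xs).map (fun x => (x, grp arr (occI xs x))))
          = PySem.Dict.mk ((dups (xs ++ [r])).map (fun x => (x, grp arr (occI (xs ++ [r]) x)))) := by
        rw [dups_append, hc0]
        simp only [Nat.zero_ne_one, beq_iff_eq, if_false, List.append_nil]
        congr 1
        apply List.map_congr_left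
        intro x hx
        have hxr : x ≠ r := by
          intro h; subst h
          have := (mem_dups_iff xs x).1 hx
          omega
        rw [occI_append]
        simp [show (r == x) = false by simpa using Ne.symm hxr]
      rw [hge, hlen']
      apply ih (xs ++ [r]) _ harr'
      intro x
      rcases eq_or_ne x r with h | h
      · subst h
        rw [PySem.Dict.get?_insert_self, occI_append, ho]
        simp
      · rw [PySem.Dict.get?_insert_of_ne _ _ h, occI_append, hei x]
        simp [show (r == x) = false by simpa using Ne.symm h]
    · -- r seen before
      have hge? := get?_mk_map (dups xs) (fun x => grp arr (occI xs x)) r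
      by_cases hmem : r ∈ dups xs
      · -- r already has a group: overwrite in place
        have hstep : stepA arr (ei, PySem.Dict.mk ((dups xs).map (fun x => (x, grp arr (occI xs x)))))
            ((xs.length : Int), r)
            = (ei, (PySem.Dict.mk ((dups xs).map (fun x => (x, grp arr (occI xs x))))).insert r
                (grp arr (occI xs r) ++ [PySem.List.slice arr (some f) (some ((xs.length : Int) + 1))])) := by
          simp [stepA, hei r, ho, hge?, hmem]
        rw [hstep]
        have hc2 : 2 ≤ xs.count r := (mem_dups_iff xs r).1 hmem
        have hins : (PySem.Dict.mk ((dups xs).map (fun x => (x, grp arr (occI xs x))))).insert r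
                (grp arr (occI xs r) ++ [PySem.List.slice arr (some f) (some ((xs.length : Int) + 1))])
            = PySem.Dict.mk ((dups (xs ++ [r])).map (fun x => (x, grp arr (occI (xs ++ [r]) x)))) := by
          rw [PySem.Dict.insert, contains_mk_map]
          simp only [hmem, decide_true, if_pos]
          rw [dups_append]
          simp only [show (xs.count r == 1) = false by simp; omega, Bool.false_eq_true, if_false, List.append_nil]
          apply PySem.Dict.ext
          simp only [List.map_map]
          apply List.map_congr_left
          intro x hx
          rcases eq_or_ne x r with h | h
          · subst h
            simp only [Function.comp_apply, beq_self_eq_true, if_pos]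
            rw [occI_append]
            simp only [beq_self_eq_true, if_true]
            rw [grp_append arr _ (by rw [ho]; simp), ho]
            simp [PySem.List.pyGetD, PySem.List.pyGet?, PySem.List.pyIdx?]
          · simp only [Function.comp_apply,
              show (x == r) = false by simpa using h]
            rw [occI_append]
            simp [show (r == x) = false by simpa using Ne.symm h]
        rw [hins, hlen']
        apply ih (xs ++ [r]) _ harr'
        intro x
        rw [hei x, occI_append]
        rcases eq_or_ne x r with h | h
        · subst h
          simp [ho]
        · simp [show (r == x) = false by simpa using Ne.symm h]
      · -- second occurrence: create the group
        have hc1 : xs.count r = 1 := by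
          have := (mem_dups_iff xs r).2
          have h1 : 1 ≤ xs.count r := by rw [← hcnt, ho]; simp
          by_contra hne
          exact hmem (this (by omega))
        have ht : t = [] := by
          have : (occI xs r).length = 1 := by rw [hcnt, hc1]
          rw [ho] at this; simpa using this
        subst ht
        have hstep : stepA arr (ei, PySem.Dict.mk ((dups xs).map (fun x => (x, grp arr (occI xs x)))))
            ((xs.length : Int), r)
            = (ei, (PySem.Dict.mk ((dups xs).map (fun x => (x, grp arr (occI xs x))))).insert r
                [PySem.List.slice arr (some f) (some ((xs.length : Int) + 1))]) := by
          simp [stepA, hei r, ho, hge?, hmem]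
        rw [hstep]
        have hins : (PySem.Dict.mk ((dups xs).map (fun x => (x, grp arr (occI xs x))))).insert r
                [PySem.List.slice arr (some f) (some ((xs.length : Int) + 1))]
            = PySem.Dict.mk ((dups (xs ++ [r])).map (fun x => (x, grp arr (occI (xs ++ [r]) x)))) := by
          rw [PySem.Dict.insert, contains_mk_map]
          simp only [hmem, decide_false, Bool.false_eq_true, if_false]
          rw [dups_append, hc1]
          simp only [beq_self_eq_true, if_pos, List.map_append]
          congr 1
          congr 1
          · apply List.map_congr_left
            intro x hx
            have hxr : x ≠ r := by
              intro h; subst h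
              have := (mem_dups_iff xs x).1 hx
              omega
            rw [occI_append]
            simp [show (r == x) = false by simpa using Ne.symm hxr]
          · simp only [List.map_cons, List.map_nil]
            rw [occI_append, ho]
            simp [grp, PySem.List.pyGetD, PySem.List.pyGet?, PySem.List.pyIdx?]
        rw [hins, hlen']
        apply ih (xs ++ [r]) _ harr'
        intro x
        rw [hei x, occI_append]
        rcases eq_or_ne x r with h | h
        · subst h
          simp [ho]
        · simp [show (r == x) = false by simpa using Ne.symm h]

theorem A_closed (arr : List Int) :
    group_elements_by_first_occurrence arr = (dups arr).map (fun x => grp arr (occI arr x)) := by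
  unfold group_elements_by_first_occurrence
  have h0 : (PySem.Dict.empty : PySem.Dict Int (List (List Int)))
      = PySem.Dict.mk ((dups []).map (fun x => (x, grp arr (occI [] x)))) := by
    simp [dups]; rfl
  have := stepsA_inv arr arr [] PySem.Dict.empty (by simp)
    (by intro x; simp [occI, PySem.List.enumerate, PySem.Dict.get?, PySem.Dict.empty])
  simp only [List.length_nil, Nat.cast_zero] at this
  rw [h0, this]
  simp [PySem.Dict.values, List.map_map]

theorem B_closed (arr : List Int) :
    group_elements_by_first_occurrence_alt arr =
      ((PySem.List.enumerate arr 0).filter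
        (fun p => 1 < (occI arr p.2).length && p.1 == PySem.List.pyGetD (occI arr p.2) 1 0)).map
        (fun p => grp arr (occI arr p.2)) := by
  unfold group_elements_by_first_occurrence_alt
  simp only [posFold_getD]
  rw [PySem.List.foldl_append_if
    (fun p => 1 < (occI arr p.2).length && p.1 == PySem.List.pyGetD (occI arr p.2) 1 0)
    (fun p => (occI arr p.2).tail.map
      (fun j => PySem.List.slice arr (some (PySem.List.pyGetD (occI arr p.2) 0 0)) (some (j + 1))))
    (PySem.List.enumerate arr 0) []]
  simp [grp]

-- ===== VERDICT (by name: the statement is the Claim_ definition above) =====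
theorem group_elements_by_first_occurrence_spec : Claim_equal_group_elements_by_first_occurrence := by
  intro arr _
  show _ = _
  rw [A_closed, B_closed, ← bridge arr, List.map_map]
  rfl
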